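-- pv_equiv track=rewrite | github.com/natquinson-cmd/kairos-insider | worker/fetch-amf-bdif.py | extract_target_filer
-- ===== SOURCE A (Python) =====
-- def extract_target_filer(record):
--     """Extract target (SocieteConcernee) and filer (Declarant) from societes[]."""
--     societes = record.get('societes') or []
--     target = ''
--     filer = ''
--     for s in societes:
--         role = (s.get('role') or '').lower()
--         nom = s.get('raisonSociale') or ''
--         if not nom: continue
--         if 'concerne' in role or role == 'societeconcerne' or role == 'societeconcernee':
--             if not target: target = nom
--         elif 'declarant' in role or 'auteur' in role or role == 'emetteur':
--             if not filer: filer = nom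
--         else:
--             # Fallback : prendre tout sauf SocieteConcernee comme filer potentiel
--             if not filer and 'concerne' not in role: filer = nom
--     return target, filer
-- ===== SOURCE B (Python) =====
-- def extract_target_filer(record):
--     """Extract target (SocieteConcernee) and filer (Declarant) from societes[]."""
--     societes = record.get('societes') or []
--
--     def nom(s):
--         return s.get('raisonSociale') or ''
--
--     def is_target(s):
--         return 'concerne' in (s.get('role') or '').lower()
--
--     target = next((nom(s) for s in societes if nom(s) and is_target(s)), '')
--     filer = next((nom(s) for s in societes if nom(s) and not is_target(s)), '')
--     return target, filer
-- ===== Notes on version B (the rewrite author's own statement) =====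
-- stated objective: simpler
-- what changed: Replaces the single interleaved loop with a mutable (target, filer) state and a three-way branch by two independent first-match scans: target is the first named company whose role contains 'concerne', filer the first whose role does not (the declarant/auteur/emetteur branch and the fallback branch collapse into one predicate).
import Mathlib
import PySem

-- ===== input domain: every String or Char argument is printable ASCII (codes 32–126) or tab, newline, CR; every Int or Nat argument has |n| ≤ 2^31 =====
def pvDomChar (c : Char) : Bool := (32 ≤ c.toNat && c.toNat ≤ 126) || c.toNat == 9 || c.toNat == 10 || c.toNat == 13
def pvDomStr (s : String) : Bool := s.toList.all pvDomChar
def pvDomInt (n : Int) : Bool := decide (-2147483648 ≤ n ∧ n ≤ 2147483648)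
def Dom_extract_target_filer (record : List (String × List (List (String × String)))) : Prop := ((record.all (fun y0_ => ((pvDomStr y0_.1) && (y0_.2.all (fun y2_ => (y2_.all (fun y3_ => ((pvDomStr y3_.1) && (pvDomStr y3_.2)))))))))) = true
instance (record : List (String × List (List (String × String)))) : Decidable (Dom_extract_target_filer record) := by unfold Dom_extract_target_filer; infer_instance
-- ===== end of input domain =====

-- B replaces A's single interleaved (target, filer)-state loop with two independent
-- first-match scans over societes (objective: simpler).

-- ===== PORT A =====
-- dict.get(k) on an association list: first match (dicts keep unique keys)
def pvLookup (d : List (String × String)) (k : String) : Option String :=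
  (d.find? (fun p => p.1 == k)).map (·.2)

-- the body of A's for-loop, acting on the (target, filer) state
def pvStepA (tf : String × String) (s : List (String × String)) : String × String :=
  let role : String := PySem.Str.lower ((pvLookup s "role").getD "")
  let nom : String := (pvLookup s "raisonSociale").getD ""
  if nom = "" then tf
  else if PySem.Str.isIn "concerne" role || role == "societeconcerne" || role == "societeconcernee" then
    (if tf.1 = "" then (nom, tf.2) else tf)
  else if PySem.Str.isIn "declarant" role || PySem.Str.isIn "auteur" role || role == "emetteur" then
    (if tf.2 = "" then (tf.1, nom) else tf)
  else
    (if tf.2 = "" && !(PySem.Str.isIn "concerne" role) then (tf.1, nom) else tf)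

def extract_target_filer (record : List (String × List (List (String × String)))) : String × String :=
  let societes := ((record.find? (fun p => p.1 == "societes")).map (·.2)).getD []
  societes.foldl pvStepA ("", "")

-- ===== PORT B =====
def pvNom (s : List (String × String)) : String := (pvLookup s "raisonSociale").getD ""

def pvIsTarget (s : List (String × String)) : Bool :=
  PySem.Str.isIn "concerne" (PySem.Str.lower ((pvLookup s "role").getD ""))

def extract_target_filer_alt (record : List (String × List (List (String × String)))) : String × String :=
  let societes := ((record.find? (fun p => p.1 == "societes")).map (·.2)).getD []
  let target := ((societes.find? (fun s => pvNom s != "" && pvIsTarget s)).map pvNom).getD ""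
  let filer := ((societes.find? (fun s => pvNom s != "" && !pvIsTarget s)).map pvNom).getD ""
  (target, filer)

-- ===== PRECONDITION & SPEC =====
def Spec_extract_target_filer (record : List (String × List (List (String × String)))) (out : String × String) : Prop := out = extract_target_filer_alt record
instance (record : List (String × List (List (String × String)))) (out : String × String) : Decidable (Spec_extract_target_filer record out) := by unfold Spec_extract_target_filer; infer_instance

-- ===== CLAIM (what is proved, stated in full; the proofs are below) =====
def Claim_equal_extract_target_filer : Prop := ∀ (record : List (String × List (List (String × String)))), Dom_extract_target_filer record → Spec_extract_target_filer record (extract_target_filer record)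

-- ===== LEMMAS AND PROOFS =====

-- A's first branch fires exactly when the role contains "concerne" (the two literal
-- equalities are subsumed, since both literals contain "concerne")
lemma branch1_eq (role : String) :
    (PySem.Str.isIn "concerne" role || role == "societeconcerne" || role == "societeconcernee")
      = PySem.Str.isIn "concerne" role := by
  by_cases h1 : role = "societeconcerne"
  · subst h1; decide
  · by_cases h2 : role = "societeconcernee"
    · subst h2; decide
    · have e1 : (role == "societeconcerne") = false := beq_eq_false_iff_ne.mpr h1
      have e2 : (role == "societeconcernee") = false := beq_eq_false_iff_ne.mpr h2
      rw [e1, e2, Bool.or_false, Bool.or_false]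

-- A's step, simplified: targets and non-targets update independent components
lemma stepA_eq (tf : String × String) (s : List (String × String)) :
    pvStepA tf s =
      if pvNom s = "" then tf
      else if pvIsTarget s then (if tf.1 = "" then (pvNom s, tf.2) else tf)
      else (if tf.2 = "" then (tf.1, pvNom s) else tf) := by
  show (if ((pvLookup s "raisonSociale").getD "") = "" then tf else _) = _
  rw [branch1_eq]
  unfold pvNom pvIsTarget
  split_ifs <;> simp_all

-- loop invariant: A's fold from any state is B's two first-match scans,
-- each masked by the component already being set
lemma loop_eq (l : List (List (String × String))) (t f : String) :
    l.foldl pvStepA (t, f) =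
      ((if t = "" then ((l.find? (fun s => pvNom s != "" && pvIsTarget s)).map pvNom).getD "" else t),
       (if f = "" then ((l.find? (fun s => pvNom s != "" && !pvIsTarget s)).map pvNom).getD "" else f)) := by
  induction l generalizing t f with
  | nil => simp only [List.foldl_nil, List.find?_nil, Option.map_none, Option.getD_none]
           by_cases ht : t = "" <;> by_cases hf : f = "" <;> simp [ht, hf]
  | cons s l ih =>
    simp only [List.foldl_cons, stepA_eq, List.find?_cons]
    by_cases hn : pvNom s = ""
    · simp [hn, ih]
    · have hb : (pvNom s != "") = true := bne_iff_ne.mpr hn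
      by_cases ht : pvIsTarget s = true
      · by_cases htt : t = ""
        · simp [hn, hb, ht, htt, ih]
        · simp [hn, hb, ht, htt, ih]
      · simp only [Bool.not_eq_true] at ht
        by_cases hff : f = ""
        · simp [hn, hb, ht, hff, ih]
        · simp [hn, hb, ht, hff, ih]

-- ===== VERDICT (by name: the statement is the Claim_ definition above) =====
theorem extract_target_filer_spec : Claim_equal_extract_target_filer := by
  intro record _
  unfold Spec_extract_target_filer extract_target_filer extract_target_filer_alt
  simp only [loop_eq]
  simp
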